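-- pv_equiv track=rewrite | github.com/MilanRadeta/MITOpenCourseware6.x | 6.009/06-recursion-with-backtracking/q1_practice_d.py | find_anagram_groups
-- ===== SOURCE A (Python) =====
-- def find_anagram_groups(words, N):
--     """
--     >>> find_anagram_groups(["list", "silt", "list"], 3)
--     2
--     >>> find_anagram_groups(["crate", "word", "filler", "react", "trace"], 2)
--     3
--     >>> find_anagram_groups(["cat", "act", "tab", "bat", "ten"], 3) == None
--     True
--     >>> find_anagram_groups(["petal", "tale", "late", "plate"], 2)
--     2
--     """
--     for i in range(N - 1, len(words)):
--         group = words[:i + 1]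
--         letters = sorted(group[-1])
--         count = 0
--         for word in group:
--             if sorted(word) == letters:
--                 count += 1
--                 if count == N:
--                     return i
--     return None
-- ===== SOURCE B (Python) =====
-- def find_anagram_groups(words, N):
--     counts = {}
--     for i, w in enumerate(words):
--         key = ''.join(sorted(w))
--         c = counts.get(key, 0) + 1
--         counts[key] = c
--         if c == N:
--             return i
--     return None
-- ===== Notes on version B (the rewrite author's own statement) =====
-- stated objective: faster
-- what changed: A re-slices every prefix and re-sorts and recounts all its words for each candidate index; B makes a single pass, sorting each word once into an anagram key and keeping a running count per key in a dict, returning the first index whose key count reaches N.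
import Mathlib
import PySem

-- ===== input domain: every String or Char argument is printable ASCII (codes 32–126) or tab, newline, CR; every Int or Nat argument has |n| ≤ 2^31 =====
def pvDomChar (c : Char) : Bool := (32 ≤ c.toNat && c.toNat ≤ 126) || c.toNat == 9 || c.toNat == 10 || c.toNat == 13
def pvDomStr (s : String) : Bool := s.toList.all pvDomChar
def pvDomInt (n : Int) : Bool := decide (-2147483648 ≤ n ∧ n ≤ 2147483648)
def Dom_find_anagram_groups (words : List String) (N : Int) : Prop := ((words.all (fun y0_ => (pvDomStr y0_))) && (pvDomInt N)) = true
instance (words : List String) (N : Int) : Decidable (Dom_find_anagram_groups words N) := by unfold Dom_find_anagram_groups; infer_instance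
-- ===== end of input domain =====

-- B replaces A's rescan of every prefix (sort the last word, re-sort and recount the whole
-- prefix for each i) by a single left-to-right pass keeping a dict of running counts per
-- sorted-letters key; objective: faster (each word is sorted once, no inner prefix scan).

-- ===== PORT A =====
-- inner 'for word in group' loop with the running count and early 'return i'
def pvA_inner (letters : List Char) (N : Int) (i : Int) : List String → Int → Option Int
  | [], _ => none
  | w :: ws, count =>
    if PySem.List.sorted w.toList (fun c => c) false = letters then
      (if count + 1 = N then some i else pvA_inner letters N i ws (count + 1))
    else pvA_inner letters N i ws count

-- outer 'for i in range(N - 1, len(words))' loop over the index list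
def pvA_outer (words : List String) (N : Int) : List Int → Option Int
  | [] => none
  | i :: is =>
    let group := PySem.List.slice words none (some (i + 1))   -- words[:i + 1]
    match PySem.List.pyGet? group (-1) with                   -- group[-1]; none = IndexError (outside Pre_)
    | none => none
    | some last =>
      match pvA_inner (PySem.List.sorted last.toList (fun c => c) false) N i group 0 with
      | some r => some r
      | none => pvA_outer words N is

def find_anagram_groups (words : List String) (N : Int) : Option Int :=
  pvA_outer words N (PySem.List.pyRange (N - 1) (PySem.List.len words) 1)

-- ===== PORT B =====
-- one pass: running counter dict keyed by ''.join(sorted(w)) (= the string of sorted chars)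
def pvB_loop (N : Int) : List String → Int → PySem.Dict String Int → Option Int
  | [], _, _ => none
  | w :: ws, i, counts =>
    let key := String.ofList (PySem.List.sorted w.toList (fun c => c) false)
    let c := counts.getD key 0 + 1
    let counts' := counts.insert key c
    if c = N then some i else pvB_loop N ws (i + 1) counts'

def find_anagram_groups_alt (words : List String) (N : Int) : Option Int :=
  pvB_loop N words 0 PySem.Dict.empty

-- ===== PRECONDITION & SPEC =====
-- Pre_ excludes exactly N ≤ 0: there A always reaches an empty slice words[:i+1] and
-- group[-1] raises IndexError (count == N can never fire for N ≤ 0).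
def Pre_find_anagram_groups (words : List String) (N : Int) : Prop := 1 ≤ N
instance (words : List String) (N : Int) : Decidable (Pre_find_anagram_groups words N) := by unfold Pre_find_anagram_groups; infer_instance
def pvWitness_find_anagram_groups : List String × Int := (["list", "silt", "list"], 3)


def Spec_find_anagram_groups (words : List String) (N : Int) (out : Option Int) : Prop := out = find_anagram_groups_alt words N
instance (words : List String) (N : Int) (out : Option Int) : Decidable (Spec_find_anagram_groups words N out) := by unfold Spec_find_anagram_groups; infer_instance

-- ===== CLAIM (what is proved, stated in full; the proofs are below) =====
def Claim_equal_find_anagram_groups : Prop := ∀ (words : List String) (N : Int), Dom_find_anagram_groups words N → Pre_find_anagram_groups words N → Spec_find_anagram_groups words N (find_anagram_groups words N)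

-- ===== LEMMAS AND PROOFS =====

-- the anagram key of a word, and the count of words with a given key in a prefix
def pvKey (w : String) : String := String.ofList (PySem.List.sorted w.toList (fun c => c) false)
def pvCnt (pre : List String) (k : String) : Int :=
  (pre.countP (fun v => decide (pvKey v = k)) : Int)

-- mid-level scans: first index whose whole-prefix key-count is ≥ N (A's behaviour) / = N (B's)
def pvGe (N : Int) : List String → List String → Int → Option Int
  | _, [], _ => none
  | pre, w :: ws, i =>
    if N ≤ pvCnt (pre ++ [w]) (pvKey w) then some i else pvGe N (pre ++ [w]) ws (i + 1)

def pvEq (N : Int) : List String → List String → Int → Option Int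
  | _, [], _ => none
  | pre, w :: ws, i =>
    if pvCnt (pre ++ [w]) (pvKey w) = N then some i else pvEq N (pre ++ [w]) ws (i + 1)

lemma pvCnt_le_length (pre : List String) (k : String) : pvCnt pre k ≤ (pre.length : Int) := by
  simp [pvCnt]
  exact_mod_cast List.countP_le_length

lemma pvCnt_append_singleton (pre : List String) (w : String) (k : String) :
    pvCnt (pre ++ [w]) k = pvCnt pre k + (if pvKey w = k then 1 else 0) := by
  by_cases h : pvKey w = k <;> simp [pvCnt, List.countP_append, h]

-- A's inner loop computes: return i iff the whole-group anagram count reaches N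
lemma pvA_inner_eq (letters : List Char) (N i : Int) :
    ∀ (ws : List String) (count : Int), count < N →
      pvA_inner letters N i ws count =
        if N ≤ count + (ws.countP (fun w => decide (PySem.List.sorted w.toList (fun c => c) false = letters)) : Int)
        then some i else none := by
  intro ws
  induction ws with
  | nil =>
    intro count h
    simp [pvA_inner]
    omega
  | cons w ws ih =>
    intro count h
    by_cases hw : PySem.List.sorted w.toList (fun c => c) false = letters
    · by_cases h2 : count + 1 = N
      · have hc : (0 : Int) ≤ (ws.countP (fun w => decide (PySem.List.sorted w.toList (fun c => c) false = letters)) : Int) := by positivity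
        simp [pvA_inner, hw, h2]
        omega
      · have := ih (count + 1) (by omega)
        simp only [pvA_inner, if_neg h2, this, List.countP_cons, hw]
        simp
        congr 1
        simp
        constructor <;> intro <;> omega
    · have := ih count h
      simp only [pvA_inner, this, List.countP_cons, hw]
      simp

lemma countP_eq_pvCnt (g : List String) (w : String) :
    (g.countP (fun v => decide (PySem.List.sorted v.toList (fun c => c) false = PySem.List.sorted w.toList (fun c => c) false)) : Int)
      = pvCnt g (pvKey w) := by
  simp only [pvCnt, pvKey]
  congr 2
  funext v
  simp [String.ofList_inj]

lemma take_succ_append (pre : List String) (w : String) (ws : List String) :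
    (pre ++ w :: ws).take (pre.length + 1) = pre ++ [w] := by
  rw [List.take_append]
  simp

-- A's outer loop, started at index pre.length, is the ≥-scan over the remaining suffix
lemma pvA_outer_eq (N : Int) (hN : 1 ≤ N) (words : List String) :
    ∀ (ws pre : List String), words = pre ++ ws →
      pvA_outer words N (PySem.List.pyRange (pre.length : Int) (words.length : Int) 1)
        = pvGe N pre ws (pre.length : Int) := by
  intro ws
  induction ws with
  | nil =>
    intro pre hpre
    subst hpre
    rw [PySem.List.pyRange_one_eq_nil (by simp)]
    simp [pvA_outer, pvGe]
  | cons w ws ih =>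
    intro pre hpre
    have hlt : (pre.length : Int) < (words.length : Int) := by
      subst hpre; simp
    rw [PySem.List.pyRange_one_cons hlt]
    have hgroup : PySem.List.slice words none (some ((pre.length : Int) + 1)) = pre ++ [w] := by
      rw [PySem.List.slice_to words (by positivity)]
      have : ((pre.length : Int) + 1).toNat = pre.length + 1 := by omega
      rw [this, hpre, take_succ_append]
    simp only [pvA_outer, hgroup, PySem.List.pyGet?_neg_one_append_singleton]
    rw [pvA_inner_eq _ _ _ _ 0 (by omega), countP_eq_pvCnt]
    by_cases hcond : N ≤ pvCnt (pre ++ [w]) (pvKey w)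
    · simp only [zero_add] at *
      rw [if_pos hcond]
      simp [pvGe, hcond]
    · simp only [zero_add] at *
      rw [if_neg hcond]
      have hrec := ih (pre ++ [w]) (by simp [hpre])
      simp only [List.length_append, List.length_cons, List.length_nil, Nat.cast_add,
        Nat.cast_one, Nat.cast_zero, zero_add] at hrec
      simp [pvGe, hcond]
      rw [← hrec]

-- positions with prefix shorter than N can never fire: skip them
lemma pvGe_skip (N : Int) :
    ∀ (k : Nat) (ws pre : List String) (i : Int), (pre.length : Int) + k < N →
      pvGe N pre ws i = pvGe N (pre ++ ws.take k) (ws.drop k) (i + k) := by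
  intro k
  induction k with
  | zero => intro ws pre i _; simp
  | succ k ih =>
    intro ws pre i h
    cases ws with
    | nil => simp [pvGe]
    | cons w ws =>
      have hno : ¬ N ≤ pvCnt (pre ++ [w]) (pvKey w) := by
        have h1 := pvCnt_le_length (pre ++ [w]) (pvKey w)
        simp at h1
        omega
      have := ih ws (pre ++ [w]) (i + 1) (by simp; omega)
      have hidx : i + ((k + 1 : Nat) : Int) = i + 1 + (k : Int) := by push_cast; ring
      simp only [pvGe]
      rw [if_neg hno, this, hidx, List.take_succ_cons, List.drop_succ_cons]
      simp

-- a list shorter than N never fires at all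
lemma pvGe_none (N : Int) :
    ∀ (ws pre : List String) (i : Int), (pre.length : Int) + ws.length < N →
      pvGe N pre ws i = none := by
  intro ws
  induction ws with
  | nil => intro pre i _; rfl
  | cons w ws ih =>
    intro pre i h
    have hno : ¬ N ≤ pvCnt (pre ++ [w]) (pvKey w) := by
      have h1 := pvCnt_le_length (pre ++ [w]) (pvKey w)
      simp at h1 ⊢
      simp at h
      omega
    simp only [pvGe, if_neg hno]
    apply ih
    simp at h ⊢
    omega

-- while every running count is still below N, the first count ≥ N is exactly N
lemma pvGe_eq_pvEq (N : Int) :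
    ∀ (ws pre : List String) (i : Int), (∀ k, pvCnt pre k < N) →
      pvGe N pre ws i = pvEq N pre ws i := by
  intro ws
  induction ws with
  | nil => intro pre i _; rfl
  | cons w ws ih =>
    intro pre i hlt
    have hc := pvCnt_append_singleton pre w (pvKey w)
    rw [if_pos rfl] at hc
    have hle : pvCnt (pre ++ [w]) (pvKey w) ≤ N := by have := hlt (pvKey w); omega
    have hiff : (N ≤ pvCnt (pre ++ [w]) (pvKey w)) ↔ (pvCnt (pre ++ [w]) (pvKey w) = N) := by omega
    by_cases hcond : pvCnt (pre ++ [w]) (pvKey w) = N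
    · simp [pvGe, pvEq, hcond]
    · simp only [pvGe, pvEq, if_neg hcond, if_neg (hiff.not.mpr hcond)]
      apply ih
      intro k
      rw [pvCnt_append_singleton]
      split_ifs with hk
      · rw [← hk]; omega
      · have := hlt k; omega

-- B's loop with a faithful counter dict is the =-scan
lemma pvB_loop_eq (N : Int) :
    ∀ (ws pre : List String) (i : Int) (d : PySem.Dict String Int),
      (∀ k, d.getD k 0 = pvCnt pre k) →
      pvB_loop N ws i d = pvEq N pre ws i := by
  intro ws
  induction ws with
  | nil => intro pre i d _; rfl
  | cons w ws ih =>
    intro pre i d hd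
    have hc : d.getD (pvKey w) 0 + 1 = pvCnt (pre ++ [w]) (pvKey w) := by
      rw [hd, pvCnt_append_singleton, if_pos rfl]
    simp only [pvB_loop, pvEq]
    rw [show String.ofList (PySem.List.sorted w.toList (fun c => c) false) = pvKey w from rfl, hc]
    by_cases hcond : pvCnt (pre ++ [w]) (pvKey w) = N
    · simp [hcond]
    · rw [if_neg hcond, if_neg hcond]
      apply ih
      intro k2
      rw [PySem.Dict.getD_insert]
      by_cases hk : k2 = pvKey w
      · rw [if_pos hk, hk]
      · rw [if_neg hk, hd, pvCnt_append_singleton, if_neg (fun h => hk h.symm), add_zero]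

lemma alt_eq_pvGe (words : List String) (N : Int) (hN : 1 ≤ N) :
    find_anagram_groups_alt words N = pvGe N [] words 0 := by
  rw [find_anagram_groups_alt, pvB_loop_eq N words [] 0 PySem.Dict.empty (by intro k; simp [pvCnt]),
    pvGe_eq_pvEq N words [] 0 (by intro k; simp [pvCnt]; omega)]

-- ===== VERDICT (by name: the statement is the Claim_ definition above) =====
theorem find_anagram_groups_spec : Claim_equal_find_anagram_groups := by
  intro words N _hdom hpre
  unfold Spec_find_anagram_groups
  have hN : 1 ≤ N := hpre
  rw [alt_eq_pvGe words N hN]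
  unfold find_anagram_groups
  by_cases hc : N - 1 ≤ (words.length : Int)
  · set k : Nat := (N - 1).toNat with hk
    have hkN : (k : Int) = N - 1 := by omega
    have hkle : k ≤ words.length := by omega
    have h1 := pvA_outer_eq N hN words (words.drop k) (words.take k) (by simp)
    rw [List.length_take, Nat.min_eq_left hkle] at h1
    have h2 := pvGe_skip N k words [] 0 (by simp; omega)
    simp only [List.nil_append, zero_add] at h2
    rw [PySem.List.len_eq, ← hkN, h1, h2]
  · rw [PySem.List.len_eq, PySem.List.pyRange_one_eq_nil (by omega)]
    rw [pvGe_none N words [] 0 (by simp; omega)]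
    rfl
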